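-- pv_equiv track=rewrite | github.com/Cedric-Martz/Tron | tron.py | flood_fill_space
-- ===== SOURCE A (Python) =====
-- from collections import deque
--
-- def flood_fill_space(start_x, start_y, width, height, ai_trail, human_trail, max_depth=20):
--     """
--     Explore the space around (start_x, start_y) using BFS,
--     """
--     visited = set()
--     queue = deque()
--     queue.append((start_x, start_y, 0))
--
--     while queue:
--         x, y, depth = queue.popleft()
--         if (x, y) in visited or depth > max_depth:
--             continue
--         if x <= 0 or x >= width - 1 or y <= 0 or y >= height - 1:
--             continue
--         if (x, y) in ai_trail or (x, y) in human_trail: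
--             continue
--
--         visited.add((x, y))
--         for delta_x, delta_y in [(-1,0), (1,0), (0,-1), (0,1)]:
--             queue.append((x + delta_x, y + delta_y, depth + 1))
--
--     return len(visited)
-- ===== SOURCE B (Python) =====
-- def flood_fill_space(start_x, start_y, width, height, ai_trail, human_trail, max_depth=20):
--     """
--     Level-by-level flood fill: no deque, no per-node depth tags.
--     """
--     visited = set()
--     frontier = [(start_x, start_y)]
--     for _ in range(max_depth + 1):
--         if not frontier:
--             break
--         survivors = []
--         for (x, y) in frontier:
--             if ((x, y) not in visited
--                     and 0 < x < width - 1 and 0 < y < height - 1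
--                     and (x, y) not in ai_trail and (x, y) not in human_trail):
--                 visited.add((x, y))
--                 survivors.append((x, y))
--         frontier = [(x + dx, y + dy)
--                     for (x, y) in survivors
--                     for (dx, dy) in [(-1, 0), (1, 0), (0, -1), (0, 1)]]
--     return len(visited)
-- ===== Notes on version B (the rewrite author's own statement) =====
-- stated objective: simpler
-- what changed: Replaces the depth-tagged deque BFS by a level-by-level sweep: a plain frontier list is filtered into visited once per level and expanded to the four neighbours of the survivors, so the deque and the per-node depth counters disappear.
import Mathlib
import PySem

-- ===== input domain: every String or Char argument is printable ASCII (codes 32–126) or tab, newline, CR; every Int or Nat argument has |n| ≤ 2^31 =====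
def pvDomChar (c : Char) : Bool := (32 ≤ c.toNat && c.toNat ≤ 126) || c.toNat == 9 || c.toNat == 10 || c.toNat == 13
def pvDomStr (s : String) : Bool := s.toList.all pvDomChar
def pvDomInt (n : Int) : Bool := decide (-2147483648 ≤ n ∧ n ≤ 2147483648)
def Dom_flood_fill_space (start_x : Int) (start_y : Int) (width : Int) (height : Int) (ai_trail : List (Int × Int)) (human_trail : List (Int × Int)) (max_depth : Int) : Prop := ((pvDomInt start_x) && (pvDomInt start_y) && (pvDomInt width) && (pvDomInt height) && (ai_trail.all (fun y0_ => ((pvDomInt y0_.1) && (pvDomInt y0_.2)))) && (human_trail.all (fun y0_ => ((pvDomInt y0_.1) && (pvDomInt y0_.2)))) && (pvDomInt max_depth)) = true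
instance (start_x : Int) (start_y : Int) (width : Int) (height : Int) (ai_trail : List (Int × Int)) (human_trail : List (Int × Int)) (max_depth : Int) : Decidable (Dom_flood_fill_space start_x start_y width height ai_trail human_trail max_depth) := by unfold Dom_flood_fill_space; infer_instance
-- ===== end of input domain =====

-- B replaces A's depth-tagged deque BFS by a level-by-level frontier sweep (objective: simpler — no deque, no per-node depth bookkeeping); same return value.

-- ===== PORT A =====
-- the cells whose bounds checks pass — used only in A's termination measure (proofs only)
def pvValidFS (width height : Int) : Finset (Int × Int) :=
  ((Finset.range (width - 2).toNat).image (fun i : Nat => (1 : Int) + i))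
    ×ˢ ((Finset.range (height - 2).toNat).image (fun i : Nat => (1 : Int) + i))

-- termination helper for pvLoopA: adding a fresh in-bounds cell to visited shrinks the unvisited valid region
theorem pvCard_lt (width height : Int) (v : List (Int × Int)) (x y : Int)
    (hmem : (x, y) ∉ v) (h1 : ¬ x ≤ 0) (h2 : ¬ x ≥ width - 1) (h3 : ¬ y ≤ 0) (h4 : ¬ y ≥ height - 1) :
    ((pvValidFS width height) \ insert (x, y) v.toFinset).card
      < ((pvValidFS width height) \ v.toFinset).card := by
  have hv : (x, y) ∈ pvValidFS width height := by
    simp only [pvValidFS, Finset.mem_product, Finset.mem_image, Finset.mem_range]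
    exact ⟨⟨(x - 1).toNat, by omega, by omega⟩, ⟨(y - 1).toNat, by omega, by omega⟩⟩
  apply Finset.card_lt_card
  rw [Finset.ssubset_iff_of_subset]
  · exact ⟨(x, y), Finset.mem_sdiff.2 ⟨hv, by simpa using hmem⟩,
      by simp [Finset.mem_sdiff]⟩
  · intro c hc
    rw [Finset.mem_sdiff] at hc ⊢
    refine ⟨hc.1, fun h => hc.2 ?_⟩
    simp at h ⊢
    tauto

-- A's while loop over (visited, queue of (x, y, depth))
def pvLoopA (width height : Int) (ai_trail human_trail : List (Int × Int)) (max_depth : Int)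
    (visited : PySem.Set (Int × Int)) (queue : List (Int × Int × Int)) : Int :=
  match queue with
  | [] => (PySem.Set.len visited : Int)
  | (x, y, depth) :: rest =>
    if (x, y) ∈ visited ∨ depth > max_depth then
      pvLoopA width height ai_trail human_trail max_depth visited rest
    else if x ≤ 0 ∨ x ≥ width - 1 ∨ y ≤ 0 ∨ y ≥ height - 1 then
      pvLoopA width height ai_trail human_trail max_depth visited rest
    else if (x, y) ∈ ai_trail ∨ (x, y) ∈ human_trail then
      pvLoopA width height ai_trail human_trail max_depth visited rest
    else
      pvLoopA width height ai_trail human_trail max_depth (PySem.Set.add visited (x, y))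
        (rest ++ [(-1, 0), (1, 0), (0, -1), (0, 1)].map
          (fun dd : Int × Int => (x + dd.1, y + dd.2, depth + 1)))
termination_by 4 * ((pvValidFS width height) \ visited.toFinset).card + queue.length
decreasing_by
  · simp only [List.length_cons]; omega
  · simp only [List.length_cons]; omega
  · simp only [List.length_cons]; omega
  · rename_i h1 h2 h3
    rw [not_or] at h1
    rw [PySem.Set.add_of_not_mem h1.1, List.toFinset_append]
    have := pvCard_lt width height visited x y h1.1
      (fun h => h2 (Or.inl h)) (fun h => h2 (Or.inr (Or.inl h)))
      (fun h => h2 (Or.inr (Or.inr (Or.inl h)))) (fun h => h2 (Or.inr (Or.inr (Or.inr h))))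
    simp only [List.length_append, List.length_cons, List.length_map, List.length_nil,
      List.toFinset_cons, List.toFinset_nil, insert_empty_eq]
    rw [Finset.union_comm, Finset.singleton_union]
    omega

def flood_fill_space (start_x : Int) (start_y : Int) (width : Int) (height : Int) (ai_trail : List (Int × Int)) (human_trail : List (Int × Int)) (max_depth : Int) : Int :=
  pvLoopA width height ai_trail human_trail max_depth PySem.Set.empty [(start_x, start_y, 0)]

-- ===== PORT B =====
-- one frontier cell: admit it into visited and survivors, or skip it
def pvStepB (width height : Int) (ai_trail human_trail : List (Int × Int))
    (acc : PySem.Set (Int × Int) × List (Int × Int)) (c : Int × Int) :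
    PySem.Set (Int × Int) × List (Int × Int) :=
  if c ∉ acc.1 ∧ 0 < c.1 ∧ c.1 < width - 1 ∧ 0 < c.2 ∧ c.2 < height - 1
      ∧ c ∉ ai_trail ∧ c ∉ human_trail then
    (PySem.Set.add acc.1 c, acc.2 ++ [c])
  else acc

-- the next frontier: all four neighbours of every survivor
def pvExpand (s : List (Int × Int)) : List (Int × Int) :=
  s.flatMap (fun c => [(-1, 0), (1, 0), (0, -1), (0, 1)].map
    (fun dd : Int × Int => (c.1 + dd.1, c.2 + dd.2)))

-- B's for-loop over the max_depth+1 levels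
def pvLevelsB (width height : Int) (ai_trail human_trail : List (Int × Int))
    (visited : PySem.Set (Int × Int)) (frontier : List (Int × Int)) : Nat → Int
  | 0 => (PySem.Set.len visited : Int)
  | n + 1 =>
    if frontier = [] then (PySem.Set.len visited : Int)
    else
      let p := frontier.foldl (pvStepB width height ai_trail human_trail) (visited, [])
      pvLevelsB width height ai_trail human_trail p.1 (pvExpand p.2) n

def flood_fill_space_alt (start_x : Int) (start_y : Int) (width : Int) (height : Int) (ai_trail : List (Int × Int)) (human_trail : List (Int × Int)) (max_depth : Int) : Int :=
  pvLevelsB width height ai_trail human_trail PySem.Set.empty [(start_x, start_y)] (max_depth + 1).toNat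

-- ===== PRECONDITION & SPEC =====
def Spec_flood_fill_space (start_x : Int) (start_y : Int) (width : Int) (height : Int) (ai_trail : List (Int × Int)) (human_trail : List (Int × Int)) (max_depth : Int) (out : Int) : Prop := out = flood_fill_space_alt start_x start_y width height ai_trail human_trail max_depth
instance (start_x : Int) (start_y : Int) (width : Int) (height : Int) (ai_trail : List (Int × Int)) (human_trail : List (Int × Int)) (max_depth : Int) (out : Int) : Decidable (Spec_flood_fill_space start_x start_y width height ai_trail human_trail max_depth out) := by unfold Spec_flood_fill_space; infer_instance

-- ===== CLAIM (what is proved, stated in full; the proofs are below) =====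
def Claim_equal_flood_fill_space : Prop := ∀ (start_x : Int) (start_y : Int) (width : Int) (height : Int) (ai_trail : List (Int × Int)) (human_trail : List (Int × Int)) (max_depth : Int), Dom_flood_fill_space start_x start_y width height ai_trail human_trail max_depth → Spec_flood_fill_space start_x start_y width height ai_trail human_trail max_depth (flood_fill_space start_x start_y width height ai_trail human_trail max_depth)

-- ===== LEMMAS AND PROOFS =====

-- tag a level's cells with their depth
def pvTag (d : Int) (L : List (Int × Int)) : List (Int × Int × Int) :=
  L.map (fun c => (c.1, c.2, d))

theorem pvTag_nil (d : Int) : pvTag d [] = [] := rfl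

theorem pvTag_cons (d : Int) (x y : Int) (L : List (Int × Int)) :
    pvTag d ((x, y) :: L) = (x, y, d) :: pvTag d L := rfl

theorem pvTag_append (d : Int) (a b : List (Int × Int)) :
    pvTag d (a ++ b) = pvTag d a ++ pvTag d b := by simp [pvTag]

theorem pvExpand_nil : pvExpand [] = [] := rfl

-- once the frontier is empty B stops changing visited
theorem pvLevelsB_nil_frontier (width height : Int) (ai_trail human_trail : List (Int × Int))
    (v : PySem.Set (Int × Int)) (n : Nat) :
    pvLevelsB width height ai_trail human_trail v [] n = (PySem.Set.len v : Int) := by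
  cases n <;> simp [pvLevelsB]

theorem pvExpand_append (a b : List (Int × Int)) :
    pvExpand (a ++ b) = pvExpand a ++ pvExpand b := by
  simp [pvExpand]

-- A drains a whole level whose depth exceeds max_depth without touching visited
theorem pvDrain (width height : Int) (ai_trail human_trail : List (Int × Int)) (max_depth : Int)
    (d : Int) (hd : d > max_depth) (L : List (Int × Int)) (v : PySem.Set (Int × Int)) :
    pvLoopA width height ai_trail human_trail max_depth v (pvTag d L) = (PySem.Set.len v : Int) := by
  induction L with
  | nil => rw [pvTag_nil, pvLoopA]
  | cons c L ih =>
    obtain ⟨x, y⟩ := c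
    rw [pvTag_cons, pvLoopA, if_pos (Or.inr hd)]
    exact ih

-- pvStepB's survivor accumulator distributes over its initial value
theorem pvFoldl_acc (width height : Int) (ai_trail human_trail : List (Int × Int))
    (L : List (Int × Int)) (v : PySem.Set (Int × Int)) (s : List (Int × Int)) :
    L.foldl (pvStepB width height ai_trail human_trail) (v, s)
      = ((L.foldl (pvStepB width height ai_trail human_trail) (v, [])).1,
         s ++ (L.foldl (pvStepB width height ai_trail human_trail) (v, [])).2) := by
  induction L generalizing v s with
  | nil => simp
  | cons c L ih =>
    simp only [List.foldl_cons]
    by_cases h : c ∉ v ∧ 0 < c.1 ∧ c.1 < width - 1 ∧ 0 < c.2 ∧ c.2 < height - 1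
        ∧ c ∉ ai_trail ∧ c ∉ human_trail
    · rw [pvStepB, if_pos h, pvStepB, if_pos h]
      rw [ih (PySem.Set.add v c) (s ++ [c]), ih (PySem.Set.add v c) (([] : List (Int × Int)) ++ [c])]
      simp
    · rw [pvStepB, if_neg h, pvStepB, if_neg h]
      exact ih v s

-- one cons step of the bridge, shared by both fuel cases of pvMain
theorem pvConsStep (width height : Int) (ai_trail human_trail : List (Int × Int)) (max_depth : Int)
    (n : Nat) (d : Int) (hd : d ≤ max_depth) (x y : Int) (L N : List (Int × Int))
    (v : PySem.Set (Int × Int))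
    (ihL : ∀ (N : List (Int × Int)) (v : PySem.Set (Int × Int)),
      pvLoopA width height ai_trail human_trail max_depth v (pvTag d L ++ pvTag (d + 1) N)
        = pvLevelsB width height ai_trail human_trail
            ((L.foldl (pvStepB width height ai_trail human_trail) (v, [])).1)
            (N ++ pvExpand ((L.foldl (pvStepB width height ai_trail human_trail) (v, [])).2)) n) :
    pvLoopA width height ai_trail human_trail max_depth v (pvTag d ((x, y) :: L) ++ pvTag (d + 1) N)
      = pvLevelsB width height ai_trail human_trail
          ((((x, y) :: L).foldl (pvStepB width height ai_trail human_trail) (v, [])).1)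
          (N ++ pvExpand ((((x, y) :: L).foldl (pvStepB width height ai_trail human_trail) (v, [])).2))
          n := by
  rw [pvTag_cons, List.cons_append, List.foldl_cons, pvLoopA]
  by_cases hB : (x, y) ∉ v ∧ 0 < x ∧ x < width - 1 ∧ 0 < y ∧ y < height - 1
      ∧ (x, y) ∉ ai_trail ∧ (x, y) ∉ human_trail
  · obtain ⟨hm, hx1, hx2, hy1, hy2, ha, hh⟩ := hB
    rw [if_neg (by push_neg; exact ⟨hm, by omega⟩),
        if_neg (by push_neg; omega),
        if_neg (by push_neg; exact ⟨ha, hh⟩)]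
    have hq : (pvTag d L ++ pvTag (d + 1) N) ++ [(-1, 0), (1, 0), (0, -1), (0, 1)].map
        (fun dd : Int × Int => (x + dd.1, y + dd.2, d + 1))
        = pvTag d L ++ pvTag (d + 1) (N ++ pvExpand [(x, y)]) := by
      rw [pvTag_append, List.append_assoc]
      simp [pvTag, pvExpand]
    rw [hq, ihL (N ++ pvExpand [(x, y)]) (PySem.Set.add v (x, y))]
    have hs : pvStepB width height ai_trail human_trail (v, []) (x, y)
        = (PySem.Set.add v (x, y), [(x, y)]) := by
      rw [pvStepB, if_pos ⟨hm, hx1, hx2, hy1, hy2, ha, hh⟩]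
      rfl
    rw [hs, pvFoldl_acc width height ai_trail human_trail L (PySem.Set.add v (x, y)) [(x, y)]]
    rw [show ([(x, y)] ++ (L.foldl (pvStepB width height ai_trail human_trail)
          (PySem.Set.add v (x, y), [])).2)
        = ([(x, y)] : List (Int × Int)) ++ _ from rfl, pvExpand_append, List.append_assoc]
  · have hs : pvStepB width height ai_trail human_trail (v, []) (x, y) = (v, []) := by
      rw [pvStepB, if_neg hB]
    rw [hs]
    push_neg at hB
    by_cases h1 : (x, y) ∈ v
    · rw [if_pos (Or.inl h1)]
      exact ihL N v
    by_cases h2 : x ≤ 0 ∨ x ≥ width - 1 ∨ y ≤ 0 ∨ y ≥ height - 1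
    · rw [if_neg (by push_neg; exact ⟨h1, by omega⟩), if_pos h2]
      exact ihL N v
    by_cases h3 : (x, y) ∈ ai_trail ∨ (x, y) ∈ human_trail
    · rw [if_neg (by push_neg; exact ⟨h1, by omega⟩), if_neg h2, if_pos h3]
      exact ihL N v
    · push_neg at h2 h3
      exact absurd (hB h1 (by omega) (by omega) (by omega) (by omega) h3.1) (by simp [h3.2])

-- the bridge: A's queue, split into the rest of the current level L (depth d) and the
-- already-pushed next-level cells N (depth d+1), computes what B's remaining levels compute
theorem pvMain (width height : Int) (ai_trail human_trail : List (Int × Int)) (max_depth : Int) :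
    ∀ (n : Nat) (d : Int), d ≤ max_depth → (max_depth - d).toNat = n →
    ∀ (L N : List (Int × Int)) (v : PySem.Set (Int × Int)),
    pvLoopA width height ai_trail human_trail max_depth v (pvTag d L ++ pvTag (d + 1) N)
      = pvLevelsB width height ai_trail human_trail
          ((L.foldl (pvStepB width height ai_trail human_trail) (v, [])).1)
          (N ++ pvExpand ((L.foldl (pvStepB width height ai_trail human_trail) (v, [])).2))
          n := by
  intro n
  induction n with
  | zero =>
    intro d hd hn L N v
    induction L generalizing v N with
    | nil =>
      rw [pvTag_nil, List.nil_append, List.foldl_nil,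
          pvDrain width height ai_trail human_trail max_depth (d + 1) (by omega) N v]
      rw [pvExpand_nil, List.append_nil]
      rfl
    | cons c L ihL =>
      obtain ⟨x, y⟩ := c
      exact pvConsStep width height ai_trail human_trail max_depth 0 d hd x y L N v
        (fun N v => ihL N v)
  | succ m ihn =>
    intro d hd hn L N v
    induction L generalizing v N with
    | nil =>
      rw [pvTag_nil, List.nil_append, List.foldl_nil, pvExpand_nil, List.append_nil]
      have h1 : d + 1 ≤ max_depth := by omega
      have h2 := ihn (d + 1) h1 (by omega) N [] v
      rw [pvTag_nil, List.append_nil] at h2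
      rw [h2]
      by_cases hN : N = []
      · subst hN
        exact pvLevelsB_nil_frontier width height ai_trail human_trail v m
      · rw [pvLevelsB, if_neg hN]
        rfl
    | cons c L ihL =>
      obtain ⟨x, y⟩ := c
      exact pvConsStep width height ai_trail human_trail max_depth (m + 1) d hd x y L N v
        (fun N v => ihL N v)

-- ===== VERDICT (by name: the statement is the Claim_ definition above) =====
theorem flood_fill_space_spec : Claim_equal_flood_fill_space := by
  intro sx sy W H ai hu md _
  unfold Spec_flood_fill_space flood_fill_space flood_fill_space_alt
  by_cases hmd : md < 0
  · rw [show [(sx, sy, (0 : Int))] = pvTag 0 [(sx, sy)] from rfl,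
        pvDrain W H ai hu md 0 (by omega) [(sx, sy)] PySem.Set.empty,
        show (md + 1).toNat = 0 from by omega]
    rfl
  · push_neg at hmd
    rw [show [(sx, sy, (0 : Int))] = pvTag 0 [(sx, sy)] ++ pvTag (0 + 1) [] from rfl,
        pvMain W H ai hu md md.toNat 0 (by omega) (by omega) [(sx, sy)] [] PySem.Set.empty,
        show (md + 1).toNat = md.toNat + 1 from by omega]
    rw [pvLevelsB, if_neg (by simp)]
    simp
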